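-- pv_equiv track=rewrite | github.com/fpeter10/AdatNinja | methods.py | coerce_cols
-- ===== SOURCE A (Python) =====
-- def coerce_cols(merge_cols):
--     """
--     Always return a flat List[str] of column names (split by whitespace).
--     Accepts: None, str, List[str], or List[str-with-spaces].
--     """
--     if merge_cols is None:
--         return []
--     # If it's already a list, flatten and split items that contain spaces
--     if isinstance(merge_cols, list):
--         out = []
--         for item in merge_cols:
--             if isinstance(item, str):
--                 out.extend([t for t in item.split() if t])
--         return out
--     # If it's a string, split on any whitespace
--     if isinstance(merge_cols, str):
--         return [t for t in merge_cols.split() if t]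
--     # Otherwise it's unexpected
--     raise TypeError(f"These cols has unexpected type: {type(merge_cols)}")
-- ===== SOURCE B (Python) =====
-- def coerce_cols(merge_cols):
--     """
--     Always return a flat List[str] of column names (split by whitespace).
--     Accepts: None, str, List[str], or List[str-with-spaces].
--     """
--     if merge_cols is None:
--         items = []
--     elif isinstance(merge_cols, str):
--         items = [merge_cols]
--     elif isinstance(merge_cols, list):
--         items = merge_cols
--     else:
--         raise TypeError(f"These cols has unexpected type: {type(merge_cols)}")
--     return " ".join(t for t in items if isinstance(t, str)).split()
-- ===== Notes on version B (the rewrite author's own statement) =====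
-- stated objective: simpler
-- what changed: B first normalizes the argument to one list of items, then produces the result in a single join-then-split pass (' '.join(...).split()) instead of A's three branch-local split/flatten loops with an accumulator.
import Mathlib
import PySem

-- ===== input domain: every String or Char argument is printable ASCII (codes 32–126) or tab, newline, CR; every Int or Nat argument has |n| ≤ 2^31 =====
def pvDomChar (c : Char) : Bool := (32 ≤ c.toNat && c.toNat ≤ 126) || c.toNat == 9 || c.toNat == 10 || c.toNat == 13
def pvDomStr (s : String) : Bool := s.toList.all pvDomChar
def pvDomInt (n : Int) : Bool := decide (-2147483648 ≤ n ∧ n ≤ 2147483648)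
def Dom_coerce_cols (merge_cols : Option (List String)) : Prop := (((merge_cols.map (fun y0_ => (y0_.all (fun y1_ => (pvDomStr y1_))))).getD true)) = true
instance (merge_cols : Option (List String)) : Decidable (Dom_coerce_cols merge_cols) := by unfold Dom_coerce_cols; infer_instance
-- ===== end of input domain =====

-- B replaces A's branch-local accumulator loops by one normalization step plus a single
-- join-then-split pass (' '.join(items).split()); objective: simpler, same cost.
-- Under the type convention the argument is None or a list of strings, so A's bare-string
-- branch and its TypeError branch are unreachable and do not appear in the ports.

-- ===== PORT A =====
def coerce_cols (merge_cols : Option (List String)) : List String :=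
  match merge_cols with
  | none => []
  | some xs =>
      -- out = []; for item in merge_cols: out.extend([t for t in item.split() if t])
      xs.foldl (fun out item => out ++ ((PySem.Str.split₀ item).filter (fun t => t ≠ ""))) []

-- ===== PORT B =====
def coerce_cols_alt (merge_cols : Option (List String)) : List String :=
  -- items = [] if merge_cols is None else merge_cols; return " ".join(items).split()
  let items : List String := match merge_cols with | none => [] | some xs => xs
  PySem.Str.split₀ (PySem.Str.join " " items)

-- ===== PRECONDITION & SPEC =====
def Spec_coerce_cols (merge_cols : Option (List String)) (out : List String) : Prop := out = coerce_cols_alt merge_cols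
instance (merge_cols : Option (List String)) (out : List String) : Decidable (Spec_coerce_cols merge_cols out) := by unfold Spec_coerce_cols; infer_instance

-- ===== CLAIM (what is proved, stated in full; the proofs are below) =====
def Claim_equal_coerce_cols : Prop := ∀ (merge_cols : Option (List String)), Dom_coerce_cols merge_cols → Spec_coerce_cols merge_cols (coerce_cols merge_cols)

-- ===== LEMMAS AND PROOFS =====

-- split₀.go is accumulator-compositional
theorem split_go_acc : ∀ (s : List Char) (cur : List Char) (acc : List (List Char)),
    PySem.Chars.split₀.go s cur acc = acc.reverse ++ PySem.Chars.split₀.go s cur [] := by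
  intro s
  induction s with
  | nil => intro cur acc; simp only [PySem.Chars.split₀.go]; split_ifs <;> simp
  | cons c rest ih =>
      intro cur acc
      simp only [PySem.Chars.split₀.go]
      split_ifs with h1 h2
      · exact ih [] acc
      · rw [ih [] (cur.reverse :: acc), ih [] [cur.reverse]]; simp
      · exact ih _ _

-- consuming "a ++ ' ' :: b" first runs go on a, flushes at the space, then runs on b
theorem split_go_space : ∀ (a : List Char) (cur : List Char) (acc : List (List Char)) (b : List Char),
    PySem.Chars.split₀.go (a ++ ' ' :: b) cur acc
      = PySem.Chars.split₀.go b [] ((PySem.Chars.split₀.go a cur acc).reverse) := by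
  intro a
  induction a with
  | nil =>
      intro cur acc b
      have hsp : PySem.Chars.isspace ' ' = true := by decide
      simp only [List.nil_append, PySem.Chars.split₀.go, hsp, if_true]
      split_ifs <;> simp
  | cons c rest ih =>
      intro cur acc b
      simp only [List.cons_append, PySem.Chars.split₀.go]
      split_ifs <;> rw [ih]

theorem split₀_append_space (a b : List Char) :
    PySem.Chars.split₀ (a ++ ' ' :: b) = PySem.Chars.split₀ a ++ PySem.Chars.split₀ b := by
  simp only [PySem.Chars.split₀]
  rw [split_go_space, split_go_acc]
  simp

-- whitespace-split distributes over a single-space join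
theorem split₀_join : ∀ (parts : List (List Char)),
    PySem.Chars.split₀ (PySem.Chars.join [' '] parts) = parts.flatMap PySem.Chars.split₀ := by
  intro parts
  induction parts with
  | nil => simp [PySem.Chars.join_nil]; decide
  | cons p rest ih =>
      cases rest with
      | nil => simp [PySem.Chars.join_singleton]
      | cons q r =>
          rw [PySem.Chars.join_cons_cons]
          have h : p ++ [' '] ++ PySem.Chars.join [' '] (q :: r)
              = p ++ ' ' :: PySem.Chars.join [' '] (q :: r) := by simp
          rw [h, split₀_append_space, ih]
          simp

-- every word produced by split₀ is nonempty
theorem split_go_ne_nil : ∀ (s cur : List Char) (acc : List (List Char)),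
    (∀ w ∈ acc, w ≠ []) → ∀ w ∈ PySem.Chars.split₀.go s cur acc, w ≠ [] := by
  intro s
  induction s with
  | nil =>
      intro cur acc hacc w hw
      simp only [PySem.Chars.split₀.go] at hw
      split_ifs at hw with h
      · exact hacc w (by simpa using hw)
      · simp at hw
        rcases hw with h1 | h1
        · exact hacc w h1
        · subst h1; simpa [List.isEmpty_iff] using h
  | cons c rest ih =>
      intro cur acc hacc w hw
      simp only [PySem.Chars.split₀.go] at hw
      split_ifs at hw with h1 h2
      · exact ih _ _ hacc w hw
      · refine ih _ _ ?_ w hw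
        intro x hx
        simp at hx
        rcases hx with h | h
        · subst h; simpa [List.isEmpty_iff] using h2
        · exact hacc x h
      · exact ih _ _ hacc w hw

theorem str_split₀_ne_empty (s : String) : ∀ w ∈ PySem.Str.split₀ s, w ≠ "" := by
  intro w hw
  simp only [PySem.Str.split₀, List.mem_map] at hw
  obtain ⟨u, hu, rfl⟩ := hw
  have hne : u ≠ [] := split_go_ne_nil s.toList [] [] (by simp) u hu
  intro he
  exact hne (by simpa using congrArg String.toList he)

-- the redundant `if t` filter in A drops nothing
theorem filter_split₀ (item : String) :
    (PySem.Str.split₀ item).filter (fun t => t ≠ "") = PySem.Str.split₀ item := by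
  apply List.filter_eq_self.mpr
  intro w hw
  simpa using str_split₀_ne_empty item w hw

-- ===== VERDICT (by name: the statement is the Claim_ definition above) =====
theorem coerce_cols_spec : Claim_equal_coerce_cols := by
  intro merge_cols _
  unfold Spec_coerce_cols coerce_cols coerce_cols_alt
  cases merge_cols with
  | none => decide
  | some xs =>
      simp only [filter_split₀, PySem.List.foldl_append_eq_flatMap, List.nil_append]
      simp only [PySem.Str.split₀, PySem.Str.toList_join]
      have : (" " : String).toList = [' '] := by decide
      rw [this, split₀_join]
      simp only [List.map_flatMap, List.flatMap_map]
      rfl
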